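-- pv_equiv track=rewrite | github.com/MauriceCalvert/andante | builder/figuration/selector.py | would_create_cross_relation
-- ===== SOURCE A (Python) =====
-- def _degree_to_semitone_approx(degree: int, start_midi: int) -> int:
--     """Approximate MIDI pitch from scale degree offset.
--
--     Uses major scale intervals for approximation:
--     degree 0 = 0, 1 = 2, 2 = 4, 3 = 5, 4 = 7, 5 = 9, 6 = 11, 7 = 12
--     """
--     # Major scale semitone offsets for degrees 0-7
--     major_offsets = [0, 2, 4, 5, 7, 9, 11, 12]
--     octaves = degree // 7
--     remainder = degree % 7
--     if remainder < 0:
--         octaves -= 1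
--         remainder += 7
--     semitones = octaves * 12 + major_offsets[remainder]
--     return start_midi + semitones
--
-- CROSS_RELATION_INTERVALS: frozenset[int] = frozenset({1, 11, 13, 23})
--
-- def would_create_cross_relation(
--     soprano_degrees: tuple[int, ...],
--     bass_degrees: tuple[int, ...],
--     soprano_start_midi: int,
--     bass_start_midi: int,
-- ) -> bool:
--     """Check if bass figure would create cross-relation with soprano.
--
--     A cross-relation occurs when one voice has a pitch that is a minor 2nd
--     (1 semitone) or minor 9th (13 semitones) from a concurrent pitch in
--     the other voice. E.g., A natural in bass against Bb in soprano.
--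
--     Checks all pairs of pitches since figures may have different rhythmic
--     densities and concurrent notes may not align by index.
--
--     Args:
--         soprano_degrees: Soprano figure degrees (relative to start)
--         bass_degrees: Bass candidate degrees (relative to start)
--         soprano_start_midi: Soprano starting MIDI pitch
--         bass_start_midi: Bass starting MIDI pitch
--
--     Returns:
--         True if bass candidate would create cross-relation.
--     """
--     if not soprano_degrees or not bass_degrees:
--         return False
--     soprano_pitches: set[int] = set()
--     for d in soprano_degrees:
--         pitch = _degree_to_semitone_approx(d, soprano_start_midi)
--         soprano_pitches.add(pitch)
--     for d in bass_degrees: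
--         b_pitch = _degree_to_semitone_approx(d, bass_start_midi)
--         for s_pitch in soprano_pitches:
--             interval = abs(b_pitch - s_pitch)
--             if interval in CROSS_RELATION_INTERVALS:
--                 return True
--     return False
-- ===== SOURCE B (Python) =====
-- _MAJOR_OFFSETS = (0, 2, 4, 5, 7, 9, 11, 12)
-- _OFFSETS = (1, -1, 11, -11, 13, -13, 23, -23)
--
--
-- def _pitch(degree, start_midi):
--     return start_midi + (degree // 7) * 12 + _MAJOR_OFFSETS[degree % 7]
--
--
-- def would_create_cross_relation(soprano_degrees, bass_degrees,
--                                 soprano_start_midi, bass_start_midi):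
--     forbidden = {_pitch(d, soprano_start_midi) + off
--                  for d in soprano_degrees for off in _OFFSETS}
--     bass_pitches = {_pitch(d, bass_start_midi) for d in bass_degrees}
--     return not bass_pitches.isdisjoint(forbidden)
-- ===== Notes on version B (the rewrite author's own statement) =====
-- stated objective: simpler
-- what changed: Replaces A's nested bass-pitch x soprano-pitch abs-interval scan with one precomputed forbidden-pitch set (each soprano pitch plus/minus each cross-relation interval) and a single set-disjointness test against the bass-pitch set.
import Mathlib
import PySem

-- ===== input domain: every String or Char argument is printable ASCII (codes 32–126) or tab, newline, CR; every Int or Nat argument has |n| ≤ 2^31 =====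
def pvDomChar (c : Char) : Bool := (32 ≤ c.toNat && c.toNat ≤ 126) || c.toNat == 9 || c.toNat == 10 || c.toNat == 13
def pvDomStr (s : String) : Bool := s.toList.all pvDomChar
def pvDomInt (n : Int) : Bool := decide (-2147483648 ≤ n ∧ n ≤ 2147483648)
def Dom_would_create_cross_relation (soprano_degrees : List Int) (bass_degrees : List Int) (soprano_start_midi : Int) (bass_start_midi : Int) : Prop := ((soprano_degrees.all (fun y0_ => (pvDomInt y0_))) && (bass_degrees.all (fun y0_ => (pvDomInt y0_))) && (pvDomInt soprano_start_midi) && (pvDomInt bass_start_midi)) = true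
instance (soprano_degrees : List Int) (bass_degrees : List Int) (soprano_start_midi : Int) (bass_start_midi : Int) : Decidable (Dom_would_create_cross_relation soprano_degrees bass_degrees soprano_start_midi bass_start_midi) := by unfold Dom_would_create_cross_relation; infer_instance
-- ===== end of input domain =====

-- B replaces A's nested bass×soprano abs-interval scan by a precomputed forbidden-pitch
-- set (soprano pitch ± each cross-relation interval) intersected with the bass-pitch set (objective: simpler).

-- ===== PORT A =====
-- _degree_to_semitone_approx, step for step (the remainder-<0 branch is kept; remainder
-- is always in [0,7), so the list index is in range and pyGetD with default 0 is exact)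
def degreeToSemitoneApprox (degree : Int) (start_midi : Int) : Int :=
  let major_offsets : List Int := [0, 2, 4, 5, 7, 9, 11, 12]
  let octaves := PySem.Int.floordiv degree 7
  let remainder := PySem.Int.mod degree 7
  let p := if remainder < 0 then (octaves - 1, remainder + 7) else (octaves, remainder)
  let semitones := p.1 * 12 + PySem.List.pyGetD major_offsets p.2 0
  start_midi + semitones

def would_create_cross_relation (soprano_degrees : List Int) (bass_degrees : List Int) (soprano_start_midi : Int) (bass_start_midi : Int) : Bool :=
  if soprano_degrees.isEmpty || bass_degrees.isEmpty then false
  else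
    let soprano_pitches : PySem.Set Int :=
      soprano_degrees.foldl (fun acc d => PySem.Set.add acc (degreeToSemitoneApprox d soprano_start_midi)) PySem.Set.empty
    bass_degrees.any (fun d =>
      let b_pitch := degreeToSemitoneApprox d bass_start_midi
      soprano_pitches.any (fun s_pitch => ([1, 11, 13, 23] : List Int).contains |b_pitch - s_pitch|))

-- ===== PORT B =====
def pitchB (degree : Int) (start_midi : Int) : Int :=
  start_midi + (PySem.Int.floordiv degree 7) * 12 +
    PySem.List.pyGetD [0, 2, 4, 5, 7, 9, 11, 12] (PySem.Int.mod degree 7) 0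

def would_create_cross_relation_alt (soprano_degrees : List Int) (bass_degrees : List Int) (soprano_start_midi : Int) (bass_start_midi : Int) : Bool :=
  let forbidden : PySem.Set Int :=
    PySem.Set.ofList (soprano_degrees.flatMap (fun d =>
      ([1, -1, 11, -11, 13, -13, 23, -23] : List Int).map (fun off => pitchB d soprano_start_midi + off)))
  let bass_pitches : PySem.Set Int :=
    PySem.Set.ofList (bass_degrees.map (fun d => pitchB d bass_start_midi))
  !(PySem.Set.isdisjoint bass_pitches forbidden)

-- ===== PRECONDITION & SPEC =====
def Spec_would_create_cross_relation (soprano_degrees : List Int) (bass_degrees : List Int) (soprano_start_midi : Int) (bass_start_midi : Int) (out : Bool) : Prop := out = would_create_cross_relation_alt soprano_degrees bass_degrees soprano_start_midi bass_start_midi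
instance (soprano_degrees : List Int) (bass_degrees : List Int) (soprano_start_midi : Int) (bass_start_midi : Int) (out : Bool) : Decidable (Spec_would_create_cross_relation soprano_degrees bass_degrees soprano_start_midi bass_start_midi out) := by unfold Spec_would_create_cross_relation; infer_instance

-- ===== CLAIM (what is proved, stated in full; the proofs are below) =====
def Claim_equal_would_create_cross_relation : Prop := ∀ (soprano_degrees : List Int) (bass_degrees : List Int) (soprano_start_midi : Int) (bass_start_midi : Int), Dom_would_create_cross_relation soprano_degrees bass_degrees soprano_start_midi bass_start_midi → Spec_would_create_cross_relation soprano_degrees bass_degrees soprano_start_midi bass_start_midi (would_create_cross_relation soprano_degrees bass_degrees soprano_start_midi bass_start_midi)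

-- ===== LEMMAS AND PROOFS =====

-- A's remainder-<0 adjustment is dead code (Python's % 7 is already nonnegative), so the two pitch helpers agree.
theorem pitch_eq (d m : Int) : degreeToSemitoneApprox d m = pitchB d m := by
  have h : ¬ (d % (7:Int)) < 0 := not_lt.mpr (Int.emod_nonneg d (by norm_num))
  simp [degreeToSemitoneApprox, pitchB, h]
  ring

-- the arithmetic bridge: |x - y| is a cross-relation interval iff x = y + off for one of B's signed offsets
theorem abs_interval_iff (x y : Int) :
    (|x - y| ∈ ([1, 11, 13, 23] : List Int)) ↔
    (∃ off ∈ ([1, -1, 11, -11, 13, -13, 23, -23] : List Int), x = y + off) := by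
  simp only [List.mem_cons, List.not_mem_nil, or_false, exists_eq_or_imp, exists_eq_left]
  rcases abs_cases (x - y) with ⟨h, _⟩ | ⟨h, _⟩ <;> rw [h] <;> omega

theorem a_iff (s b : List Int) (sm bm : Int) :
    would_create_cross_relation s b sm bm = true ↔
    (∃ e ∈ b, ∃ d ∈ s, |pitchB e bm - pitchB d sm| ∈ ([1, 11, 13, 23] : List Int)) := by
  unfold would_create_cross_relation
  by_cases hs : s.isEmpty <;> by_cases hb : b.isEmpty <;>
    simp_all [List.isEmpty_iff, List.any_eq_true, PySem.Set.mem_foldl_add, PySem.Set.empty,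
      pitch_eq]

theorem b_iff (s b : List Int) (sm bm : Int) :
    would_create_cross_relation_alt s b sm bm = true ↔
    (∃ e ∈ b, ∃ d ∈ s, |pitchB e bm - pitchB d sm| ∈ ([1, 11, 13, 23] : List Int)) := by
  unfold would_create_cross_relation_alt
  simp only [Bool.not_eq_true', Bool.eq_false_iff, ne_eq, PySem.Set.isdisjoint_iff,
    PySem.Set.mem_ofList, List.mem_map, List.mem_flatMap, not_forall]
  constructor
  · rintro ⟨x, ⟨⟨e, he, rfl⟩, hmem⟩⟩
    push Not at hmem
    obtain ⟨d, hd, off, hoff, hx⟩ := hmem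
    exact ⟨e, he, d, hd, (abs_interval_iff _ _).mpr ⟨off, hoff, hx.symm⟩⟩
  · rintro ⟨e, he, d, hd, hmem⟩
    obtain ⟨off, hoff, hx⟩ := (abs_interval_iff _ _).mp hmem
    exact ⟨pitchB e bm, ⟨⟨e, he, rfl⟩, by push Not; exact ⟨d, hd, off, hoff, hx.symm⟩⟩⟩

-- ===== VERDICT (by name: the statement is the Claim_ definition above) =====
theorem would_create_cross_relation_spec : Claim_equal_would_create_cross_relation := by
  intro s b sm bm _
  unfold Spec_would_create_cross_relation
  rw [Bool.eq_iff_iff, a_iff, b_iff]
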